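-- pv_equiv track=rewrite | github.com/miliar/Code_Jam_Webscraper | solutions_python/Problem_201/969.py | calc_ranges
-- ===== SOURCE A (Python) =====
-- A = 0
--
-- B = 1
--
-- NA = 2
--
-- NB = 3
--
-- def split(n):
--     if n % 2 == 0:
--         return str(int(n/2)) + " " + str(int(n/2-1))
--     else:
--         return str(int((n-1)/2)) + " " + str(int((n-1)/2))
--
-- def calc_ranges(n, k):
--     r = [n, n+1, 1, 0]
--     while True:
--         if k > r[NA]+r[NB]:
--             k -= (r[NA] + r[NB])
--             if r[A] % 2 == 0:
--                 s = split(r[A])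
--                 r = [ int(r[A]/2 - 1), int(r[A]/2), r[NA], r[NA]+2*r[NB] ]
--             else:
--                 r = [ int(r[B]/2 - 1), int(r[B]/2), 2*r[NA]+r[NB], r[NB] ]
--             if k == 0:
--                 return str(r[B]) + " " + str(r[A])
--         elif k > r[NB]:
--             return split(r[A])
--         else:
--             return split(r[B])
-- ===== SOURCE B (Python) =====
-- def split(n):
--     if n % 2 == 0:
--         return str(int(n/2)) + " " + str(int(n/2-1))
--     else:
--         return str(int((n-1)/2)) + " " + str(int((n-1)/2))
--
-- def calc_ranges(n, k):
--     # Closed form: person k lands in the generation with p = 2^g segments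
--     # (the largest power of two <= k, or p = 1 when k <= 0).  The segment
--     # sizes in that generation are a and a+1 with p*a + nb = n - p + 1 and
--     # 0 <= nb < p; the first nb people of the generation get the larger one.
--     p = 1
--     while 2 * p <= k:
--         p *= 2
--     s = n - p + 1
--     a = s // p
--     nb = s % p
--     return split(a + 1) if k - p < nb else split(a)
-- ===== Notes on version B (the rewrite author's own statement) =====
-- stated objective: alternative
-- what changed: B replaces A's generation-by-generation segment simulation (maintaining sizes a,a+1 with their counts and subtracting whole generations from k) with a closed form: it finds the power of two p <= k by doubling, recovers the two segment sizes of that generation directly by floor division of n-p+1 by p, and picks the right one by k's rank within the generation.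
import Mathlib
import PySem

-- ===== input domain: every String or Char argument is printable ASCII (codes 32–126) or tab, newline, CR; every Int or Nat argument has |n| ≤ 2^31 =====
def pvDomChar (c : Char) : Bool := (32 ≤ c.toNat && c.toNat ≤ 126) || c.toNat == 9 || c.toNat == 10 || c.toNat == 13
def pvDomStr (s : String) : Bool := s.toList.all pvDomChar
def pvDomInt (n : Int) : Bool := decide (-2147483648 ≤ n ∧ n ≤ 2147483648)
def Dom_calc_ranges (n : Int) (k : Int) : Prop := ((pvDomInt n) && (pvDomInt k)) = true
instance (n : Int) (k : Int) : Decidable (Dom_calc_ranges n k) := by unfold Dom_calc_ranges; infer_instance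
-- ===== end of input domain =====

-- B replaces A's generation-by-generation simulation with a closed form (largest power of two ≤ k,
-- then one floor division); same return value on every input, similar asymptotic cost.

-- ===== PORT A =====
-- shared helper: Python's `split(n)`; every `int(x/2)`-style division there is exact
-- (the dividend is even in each branch), so floor division is faithful to float-then-int.
def pySplit (n : Int) : String :=
  if PySem.Int.mod n 2 = 0 then
    PySem.Int.toStr (PySem.Int.floordiv n 2) ++ " " ++ PySem.Int.toStr (PySem.Int.floordiv n 2 - 1)
  else
    PySem.Int.toStr (PySem.Int.floordiv (n - 1) 2) ++ " " ++ PySem.Int.toStr (PySem.Int.floordiv (n - 1) 2)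

-- A's `while True` loop over the state r = [a, b, na, nb]; the fuel only makes the
-- recursion structural (k decreases by na+nb ≥ 1 per iteration, so fuel = k.toNat + 1 never runs out).
def calcLoop : Nat → Int → Int → Int → Int → Int → String
  | 0, _, _, _, _, _ => ""  -- unreachable with the fuel chosen in calc_ranges
  | (fuel+1), a, b, na, nb, k =>
    if na + nb < k then
      if PySem.Int.mod a 2 = 0 then
        if k - (na + nb) = 0 then
          PySem.Int.toStr (PySem.Int.floordiv a 2) ++ " " ++ PySem.Int.toStr (PySem.Int.floordiv a 2 - 1)
        else
          calcLoop fuel (PySem.Int.floordiv a 2 - 1) (PySem.Int.floordiv a 2) na (na + 2*nb) (k - (na + nb))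
      else
        if k - (na + nb) = 0 then
          PySem.Int.toStr (PySem.Int.floordiv b 2) ++ " " ++ PySem.Int.toStr (PySem.Int.floordiv b 2 - 1)
        else
          calcLoop fuel (PySem.Int.floordiv b 2 - 1) (PySem.Int.floordiv b 2) (2*na + nb) nb (k - (na + nb))
    else if nb < k then pySplit a else pySplit b

def calc_ranges (n : Int) (k : Int) : String :=
  calcLoop (k.toNat + 1) n (n+1) 1 0 k

-- ===== PORT B =====
-- `p = 1; while 2*p <= k: p *= 2` — the `0 < p` conjunct is only a totality guard (p starts at 1 and doubles).
def findP (k p : Int) : Int :=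
  if h : 0 < p ∧ 2 * p ≤ k then findP k (2 * p) else p
termination_by (k - p).toNat
decreasing_by omega

def calc_ranges_alt (n : Int) (k : Int) : String :=
  let p := findP k 1
  let s := n - p + 1
  let a := PySem.Int.floordiv s p
  let nb := PySem.Int.mod s p
  if k - p < nb then pySplit (a + 1) else pySplit a

-- ===== PRECONDITION & SPEC =====
def Spec_calc_ranges (n : Int) (k : Int) (out : String) : Prop := out = calc_ranges_alt n k
instance (n : Int) (k : Int) (out : String) : Decidable (Spec_calc_ranges n k out) := by unfold Spec_calc_ranges; infer_instance

-- ===== CLAIM (what is proved, stated in full; the proofs are below) =====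
def Claim_equal_calc_ranges : Prop := ∀ (n : Int) (k : Int), Dom_calc_ranges n k → Spec_calc_ranges n k (calc_ranges n k)

-- ===== LEMMAS AND PROOFS =====

-- B's closed form, generalized to an arbitrary generation: p segments of sizes a and a+1,
-- nb of them the larger, and k people still to seat counting from this generation.
def altCore (k p a nb : Int) : String :=
  if (k + p - 1) - findP (k + p - 1) p <
      PySem.Int.mod (p * a + nb + (p - findP (k + p - 1) p)) (findP (k + p - 1) p) then
    pySplit (PySem.Int.floordiv (p * a + nb + (p - findP (k + p - 1) p)) (findP (k + p - 1) p) + 1)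
  else
    pySplit (PySem.Int.floordiv (p * a + nb + (p - findP (k + p - 1) p)) (findP (k + p - 1) p))

lemma fd_char (p a r : Int) (hp : 0 < p) (h0 : 0 ≤ r) (h1 : r < p) :
    PySem.Int.floordiv (p * a + r) p = a ∧ PySem.Int.mod (p * a + r) p = r := by
  have hd : PySem.Int.floordiv (p * a + r) p = a := by
    rw [PySem.Int.floordiv_eq_iff_of_pos hp]
    constructor <;> nlinarith
  refine ⟨hd, ?_⟩
  have h := PySem.Int.floordiv_mul_add_mod (p * a + r) p
  rw [hd] at h
  linarith

lemma two_mul_fd_of_even (a : Int) (h : PySem.Int.mod a 2 = 0) :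
    2 * PySem.Int.floordiv a 2 = a := by
  have h2 := PySem.Int.floordiv_mul_add_mod a 2
  rw [h] at h2
  linarith

lemma two_mul_fd_succ_of_odd (a : Int) (h : ¬ PySem.Int.mod a 2 = 0) :
    2 * PySem.Int.floordiv (a + 1) 2 = a + 1 := by
  have h0 := PySem.Int.mod_nonneg a (b := 2) (by norm_num)
  have h1 := PySem.Int.mod_lt a (b := 2) (by norm_num)
  have hm : PySem.Int.mod a 2 = 1 := by omega
  have h2 := PySem.Int.floordiv_mul_add_mod a 2
  rw [hm] at h2
  have he : PySem.Int.mod (a + 1) 2 = 0 := by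
    rw [PySem.Int.mod_eq_zero_iff_dvd]
    exact ⟨PySem.Int.floordiv a 2 + 1, by linarith⟩
  exact two_mul_fd_of_even (a + 1) he

-- one unrolling of the generation: splitting all p segments preserves the closed form
lemma altCore_descend (k p a nb a' nb' : Int) (hp : 0 < p) (hk : p < k)
    (hs : 2 * p * a' + nb' + p = p * a + nb) :
    altCore (k - p) (2 * p) a' nb' = altCore k p a nb := by
  unfold altCore
  have hK : (k - p) + 2 * p - 1 = k + p - 1 := by ring
  rw [hK]
  have hfp : findP (k + p - 1) p = findP (k + p - 1) (2 * p) := by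
    conv_lhs => rw [findP]
    rw [dif_pos ⟨hp, by omega⟩]
  rw [hfp]
  have hs' : 2 * p * a' + nb' + (2 * p - findP (k + p - 1) (2 * p))
      = p * a + nb + (p - findP (k + p - 1) (2 * p)) := by linarith
  rw [hs']

-- the generation in which the loop stops: the closed form reads off a and nb again
lemma altCore_stop (k p a nb : Int) (hp : 0 < p) (hk : k ≤ p)
    (h0 : 0 ≤ nb) (h1 : nb < p) :
    altCore k p a nb = if nb < k then pySplit a else pySplit (a + 1) := by
  unfold altCore
  have hP : findP (k + p - 1) p = p := by
    rw [findP]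
    rw [dif_neg]
    rintro ⟨-, h⟩
    omega
  rw [hP]
  have hzero : p * a + nb + (p - p) = p * a + nb := by ring
  rw [hzero]
  obtain ⟨hd, hm⟩ := fd_char p a nb hp h0 h1
  rw [hd, hm]
  by_cases h : nb < k
  · rw [if_neg (by omega), if_pos h]
  · rw [if_pos (by omega), if_neg h]

-- main loop invariant: A's simulation from any valid generation state equals the closed form
lemma calcLoop_eq_altCore : ∀ (fuel : Nat) (a na nb k : Int), 1 ≤ na → 0 ≤ nb → 1 ≤ k →
    k.toNat < fuel → calcLoop fuel a (a+1) na nb k = altCore k (na + nb) a nb := by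
  intro fuel
  induction fuel with
  | zero => intro a na nb k _ _ hk hf; omega
  | succ fuel ih =>
    intro a na nb k hna hnb hk hf
    rw [calcLoop]
    by_cases hgt : na + nb < k
    · rw [if_pos hgt]
      have hk' : (1:Int) ≤ k - (na + nb) := by omega
      by_cases he : PySem.Int.mod a 2 = 0
      · rw [if_pos he, if_neg (by omega : ¬ (k - (na + nb) = 0))]
        have hrec := ih (PySem.Int.floordiv a 2 - 1) na (na + 2*nb) (k - (na + nb)) hna (by omega)
          hk' (by omega)
        rw [(by ring : PySem.Int.floordiv a 2 - 1 + 1 = PySem.Int.floordiv a 2)] at hrec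
        rw [hrec]
        have h2 : na + (na + 2*nb) = 2 * (na + nb) := by ring
        rw [h2]
        refine altCore_descend k (na + nb) a nb (PySem.Int.floordiv a 2 - 1) (na + 2*nb)
          (by omega) hgt ?_
        have h3 := two_mul_fd_of_even a he
        nlinarith
      · rw [if_neg he, if_neg (by omega : ¬ (k - (na + nb) = 0))]
        have hrec := ih (PySem.Int.floordiv (a+1) 2 - 1) (2*na + nb) nb (k - (na + nb)) (by omega)
          hnb hk' (by omega)
        rw [(by ring : PySem.Int.floordiv (a+1) 2 - 1 + 1 = PySem.Int.floordiv (a+1) 2)] at hrec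
        rw [hrec]
        have h2 : 2*na + nb + nb = 2 * (na + nb) := by ring
        rw [h2]
        refine altCore_descend k (na + nb) a nb (PySem.Int.floordiv (a+1) 2 - 1) nb
          (by omega) hgt ?_
        have h3 := two_mul_fd_succ_of_odd a he
        nlinarith
    · rw [if_neg hgt]
      rw [altCore_stop k (na + nb) a nb (by omega) (by omega) hnb (by omega)]

lemma altCore_one (n k : Int) : altCore k 1 n 0 = calc_ranges_alt n k := by
  unfold altCore calc_ranges_alt
  have e1 : k + 1 - 1 = k := by ring
  rw [e1]
  have e2 : 1 * n + 0 + (1 - findP k 1) = n - findP k 1 + 1 := by ring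
  rw [e2]

-- ===== VERDICT (by name: the statement is the Claim_ definition above) =====
theorem calc_ranges_spec : Claim_equal_calc_ranges := by
  intro n k _
  unfold Spec_calc_ranges calc_ranges
  rw [← altCore_one n k]
  by_cases hk : 1 ≤ k
  · rw [calcLoop_eq_altCore (k.toNat + 1) n 1 0 k (by norm_num) (by norm_num) hk (by omega)]
    rw [(by norm_num : (1:Int) + 0 = 1)]
  · rw [calcLoop]
    rw [if_neg (by omega : ¬ ((1:Int) + 0 < k)), if_neg (by omega : ¬ ((0:Int) < k))]
    unfold altCore
    rw [(by ring : k + 1 - 1 = k)]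
    have hP : findP k 1 = 1 := by
      rw [findP]
      rw [dif_neg]
      rintro ⟨-, h⟩
      omega
    rw [hP]
    rw [(by ring : 1 * n + 0 + (1 - 1) = 1 * n + 0)]
    obtain ⟨hd, hm⟩ := fd_char 1 n 0 (by norm_num) (by norm_num) (by norm_num)
    rw [hd, hm]
    rw [if_pos (by omega : k - 1 < (0:Int))]
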